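-- pv_equiv track=rewrite | github.com/SanjayChandak95/InterviewBitQuestion | GRAPH/delete_edge.py | deleteEdge
-- ===== SOURCE A (Python) =====
-- from collections import defaultdict
--
-- MOD = 10 ** 9 + 7
--
-- def deleteEdge(A, B):
--     graph = defaultdict(list)
--     # weight_subtree = [0] * (len(A))
--     for src, dest in B:
--         graph[src - 1].append(dest - 1)
--         graph[dest - 1].append(src - 1)
--     ans = [0]
--     max_sum = sum(A)
--
--     def post_order_helper(node, visited):
--         subtree_weight = A[node]
--         for child in graph[node]:
--             if child not in visited:
--                 visited.add(child)
--                 subtree_weight += post_order_helper(child, visited)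
--                 visited.discard(child)
--         ans[0] = max(ans[0], (subtree_weight*(max_sum-subtree_weight))%MOD)
--         return subtree_weight
--
--     v = set()
--     v.add(0)
--     post_order_helper(0, v)
--     v.discard(0)
--     return ans[0] % MOD
-- ===== SOURCE B (Python) =====
-- MOD = 10 ** 9 + 7
--
-- def deleteEdge(A, B):
--     # Iterative DFS with an explicit frame stack (node, remaining children, running
--     # subtree weight) instead of recursion; same path-set visiting discipline as
--     # the recursive original, so it agrees on every graph shape, and it is immune
--     # to Python's recursion limit.
--     graph = {}
--     for src, dest in B:
--         graph.setdefault(src - 1, []).append(dest - 1)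
--         graph.setdefault(dest - 1, []).append(src - 1)
--     total = sum(A)
--     best = 0
--     path = {0}
--     stack = [[0, list(graph.get(0, ())), A[0]]]
--     while stack:
--         node, children, w = stack[-1]
--         if children:
--             c = children.pop(0)
--             if c not in path:
--                 path.add(c)
--                 stack.append([c, list(graph.get(c, ())), A[c]])
--         else:
--             stack.pop()
--             best = max(best, (w * (total - w)) % MOD)
--             path.discard(node)
--             if stack:
--                 stack[-1][2] += w
--     return best % MOD
-- ===== Notes on version B (the rewrite author's own statement) =====
-- stated objective: alternative
-- what changed: Replaces the recursive path-set DFS (closure mutating a shared ans cell) by an iterative DFS over an explicit stack of (node, remaining-children, running-subtree-weight) frames with the same path-set visiting discipline, so it returns identical values on every graph shape while being immune to Python's recursion limit.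
import Mathlib
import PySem

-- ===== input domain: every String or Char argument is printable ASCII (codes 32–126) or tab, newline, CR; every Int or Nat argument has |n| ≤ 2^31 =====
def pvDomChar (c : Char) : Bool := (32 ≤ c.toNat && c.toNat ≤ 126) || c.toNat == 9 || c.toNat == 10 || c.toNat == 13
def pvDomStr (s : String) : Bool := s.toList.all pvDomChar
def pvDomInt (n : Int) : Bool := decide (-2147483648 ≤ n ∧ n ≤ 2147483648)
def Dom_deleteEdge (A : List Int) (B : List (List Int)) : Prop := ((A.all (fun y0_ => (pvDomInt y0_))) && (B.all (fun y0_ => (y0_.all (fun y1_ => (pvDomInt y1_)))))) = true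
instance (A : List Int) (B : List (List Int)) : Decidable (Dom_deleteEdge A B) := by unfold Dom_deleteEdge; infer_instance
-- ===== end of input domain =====

-- B replaces A's recursive path-set DFS by an iterative DFS over an explicit frame stack
-- (node, remaining children, running subtree weight); same visiting discipline, same
-- results (objective: alternative decomposition; no speed claim).

def pvMOD : Int := 1000000007

-- ===== PORT A =====
-- 'graph[src-1].append(dest-1)' on a defaultdict(list) is Dict.modify with default []
def pvAdjA (B : List (List Int)) : PySem.Dict Int (List Int) :=
  B.foldl (fun g row =>
    let s := (PySem.List.pyGet? row 0).getD 0 - 1   -- row unpack 'src, dest'; under Pre_ rows have length 2, so pyGet? is exact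
    let d := (PySem.List.pyGet? row 1).getD 0 - 1
    (g.modify s [] (· ++ [d])).modify d [] (· ++ [s]))
    PySem.Dict.empty

-- A's recursion, with a fuel guard for totality only: fuel drops by one per nesting
-- level, and the initial fuel 2*|B|+2 exceeds any possible recursion depth (the visited
-- path gains one distinct edge endpoint per level), so 'none' is never produced there.
mutual
def pvHelperA (g : PySem.Dict Int (List Int)) (As : List Int) (ms : Int) :
    Nat → Int → PySem.Set Int → Int → Option (Int × Int)
  | 0, _, _, _ => none
  | Nat.succ f, node, vis, ans =>
    -- subtree_weight = A[node]; loop over graph[node]; then ans = max(ans, prod)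
    match pvFoldA g As ms f (g.getD node []) vis ((PySem.List.pyGet? As node).getD 0) ans with
    | none => none
    | some (w, a) => some (w, max a (PySem.Int.mod (w * (ms - w)) pvMOD))
termination_by f _ _ _ => (f, 0)

def pvFoldA (g : PySem.Dict Int (List Int)) (As : List Int) (ms : Int) :
    Nat → List Int → PySem.Set Int → Int → Int → Option (Int × Int)
  | _, [], _, w, ans => some (w, ans)
  | f, c :: rest, vis, w, ans =>
    if PySem.Set.contains vis c then pvFoldA g As ms f rest vis w ans
    else
      -- visited.add(child) before the call; add-then-discard leaves vis unchanged after it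
      match pvHelperA g As ms f c (PySem.Set.add vis c) ans with
      | none => none
      | some (wc, a) => pvFoldA g As ms f rest vis (w + wc) a
termination_by f cs _ _ _ => (f, cs.length + 1)
end

def deleteEdge (A : List Int) (B : List (List Int)) : Int :=
  -- v = {0}; post_order_helper(0, v); return ans[0] % MOD  (max_sum = sum(A))
  match pvHelperA (pvAdjA B) A A.sum (2 * B.length + 2) 0 (PySem.Set.add PySem.Set.empty 0) 0 with
  | none => 0
  | some (_, a) => PySem.Int.mod a pvMOD

-- ===== PORT B =====
-- 'graph.setdefault(k, []).append(v)' is the same Dict.modify with default []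
def pvAdjB (B : List (List Int)) : PySem.Dict Int (List Int) :=
  B.foldl (fun g row =>
    let s := (PySem.List.pyGet? row 0).getD 0 - 1
    let d := (PySem.List.pyGet? row 1).getD 0 - 1
    (g.modify s [] (· ++ [d])).modify d [] (· ++ [s]))
    PySem.Dict.empty

-- termination bookkeeping for the while loop (not data of Source B): a per-frame fuel,
-- decremented on push exactly like A's fuel, and a potential every step decreases
def pvC (g : PySem.Dict Int (List Int)) : Nat :=
  g.values.foldl (fun m v => max m v.length) 0 + 2

def pvPot (g : PySem.Dict Int (List Int)) : List (Int × List Int × Int × Nat) → Nat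
  | [] => 0
  | (_, cs, _, f) :: st => (cs.length + 1) * (pvC g) ^ f + pvPot g st

theorem pvC_getD (g : PySem.Dict Int (List Int)) (c : Int) :
    (g.getD c []).length + 2 ≤ pvC g := by
  unfold pvC
  rw [PySem.Dict.getD_eq_get?_getD]
  rcases h : g.get? c with _ | v
  · simp
  · have hv : v ∈ g.values := by
      have := PySem.Dict.mem_items_of_get?_eq_some g h
      simp [PySem.Dict.values]
      exact ⟨c, this⟩
    have := (PySem.List.le_foldl_max_nat g.values List.length 0).2 v hv
    simpa using this

-- Source B's while loop, one step per iteration; a frame is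
-- (node, remaining children, running subtree weight, fuel)
def pvRunB (g : PySem.Dict Int (List Int)) (As : List Int) (ms : Int) :
    List (Int × List Int × Int × Nat) → PySem.Set Int → Int → Option Int
  | [], _, best => some best
  | (node, c :: rest, w, f) :: st, path, best =>
    if PySem.Set.contains path c then
      pvRunB g As ms ((node, rest, w, f) :: st) path best
    else
      match f with
      | 0 => none    -- fuel guard only; unreachable from the initial fuel
      | Nat.succ f' =>
        pvRunB g As ms
          ((c, g.getD c [], (PySem.List.pyGet? As c).getD 0, f') :: (node, rest, w, Nat.succ f') :: st)
          (PySem.Set.add path c) best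
  | (node, [], w, f) :: st, path, best =>
    let best' := max best (PySem.Int.mod (w * (ms - w)) pvMOD)
    let path' := PySem.Set.discard path node
    match st with
    | [] => some best'
    | (pn, pcs, pw, pf) :: rest => pvRunB g As ms ((pn, pcs, pw + w, pf) :: rest) path' best'
termination_by st _ _ => pvPot g st
decreasing_by
  · simp only [pvPot, List.length_cons]
    have h1 : 0 < pvC g ^ f := Nat.pow_pos (by unfold pvC; omega)
    nlinarith
  · simp only [pvPot, List.length_cons, Nat.succ_eq_add_one]
    have h2 := pvC_getD g c
    have h1 : 0 < pvC g ^ f' := Nat.pow_pos (by unfold pvC; omega)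
    have h3 : ((g.getD c []).length + 1) * pvC g ^ f' < pvC g ^ (f' + 1) := by
      rw [pow_succ, Nat.mul_comm (pvC g ^ f') (pvC g)]
      exact Nat.mul_lt_mul_of_lt_of_le (by omega) (le_refl _) h1
    nlinarith
  · simp only [pvPot, List.length_nil, Nat.zero_add, Nat.one_mul]
    have h1 : 0 < pvC g ^ f := Nat.pow_pos (by unfold pvC; omega)
    linarith

def deleteEdge_alt (A : List Int) (B : List (List Int)) : Int :=
  -- path = {0}; stack = [[0, graph.get(0, ()), A[0]]]; while stack: ...; return best % MOD
  match pvRunB (pvAdjB B) A A.sum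
      [(0, (pvAdjB B).getD 0 [], (PySem.List.pyGet? A 0).getD 0, 2 * B.length + 1)]
      (PySem.Set.add PySem.Set.empty 0) 0 with
  | none => 0
  | some b => PySem.Int.mod b pvMOD

-- ===== PRECONDITION & SPEC =====
-- nodes reachable from node 0 along the edges of B (closure reached after 2*|B|+1 rounds,
-- since there are at most 2*|B| distinct edge endpoints); A's DFS visits exactly these
def pvReachStep (B : List (List Int)) (R : PySem.Set Int) : PySem.Set Int :=
  B.foldl (fun R row =>
    let s := (PySem.List.pyGet? row 0).getD 0 - 1
    let d := (PySem.List.pyGet? row 1).getD 0 - 1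
    let R := if s ∈ R then PySem.Set.add R d else R
    if d ∈ R then PySem.Set.add R s else R) R

def pvReach (B : List (List Int)) : PySem.Set Int :=
  (pvReachStep B)^[2 * B.length + 1] (PySem.Set.add PySem.Set.empty 0)

-- Pre_ excludes exactly the inputs on which A raises: empty A (IndexError at A[0]), a row
-- of B that is not a pair (unpacking ValueError/TypeError), or a node reachable from node 0
-- whose index falls outside Python's negative-index range of A (IndexError at A[node]).
def Pre_deleteEdge (A : List Int) (B : List (List Int)) : Prop :=
  A ≠ [] ∧ (∀ row ∈ B, row.length = 2) ∧
    ∀ v ∈ pvReach B, -(A.length : Int) ≤ v ∧ v < (A.length : Int)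
instance (A : List Int) (B : List (List Int)) : Decidable (Pre_deleteEdge A B) := by
  unfold Pre_deleteEdge; infer_instance

def pvWitness_deleteEdge : List Int × List (List Int) := ([1, 2, 3], [[1, 2], [1, 3]])

def Spec_deleteEdge (A : List Int) (B : List (List Int)) (out : Int) : Prop := out = deleteEdge_alt A B
instance (A : List Int) (B : List (List Int)) (out : Int) : Decidable (Spec_deleteEdge A B out) := by unfold Spec_deleteEdge; infer_instance

-- ===== CLAIM (what is proved, stated in full; the proofs are below) =====
def Claim_equal_deleteEdge : Prop := ∀ (A : List Int) (B : List (List Int)), Dom_deleteEdge A B → Pre_deleteEdge A B → Spec_deleteEdge A B (deleteEdge A B)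

-- ===== LEMMAS AND PROOFS =====

theorem pv_discard_add (s : PySem.Set Int) (c : Int) (hm : c ∉ s) :
    PySem.Set.discard (PySem.Set.add s c) c = s := by
  simp [PySem.Set.discard, PySem.Set.add_of_not_mem hm]
  intro a ha hac
  exact hm (hac ▸ ha)

-- the machine run of one frame computes A's child fold, then pops
theorem pvRun_eq_fold (g : PySem.Dict Int (List Int)) (As : List Int) (ms : Int) :
    ∀ (f : Nat) (cs : List Int) (n w : Int) (st : List (Int × List Int × Int × Nat))
      (path : PySem.Set Int) (best : Int),
      pvRunB g As ms ((n, cs, w, f) :: st) path best =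
        match pvFoldA g As ms f cs path w best with
        | none => none
        | some (W, b) =>
          match st with
          | [] => some (max b (PySem.Int.mod (W * (ms - W)) pvMOD))
          | (pn, pcs, pw, pf) :: rest =>
            pvRunB g As ms ((pn, pcs, pw + W, pf) :: rest) (PySem.Set.discard path n)
              (max b (PySem.Int.mod (W * (ms - W)) pvMOD)) := by
  intro f
  induction f using Nat.strong_induction_on with
  | _ f IHf =>
    intro cs
    induction cs with
    | nil =>
      intro n w st path best
      cases st with
      | nil => rw [pvRunB, pvFoldA]
      | cons p rest =>
        obtain ⟨pn, pcs, pw, pf⟩ := p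
        rw [pvRunB.eq_def, pvFoldA]
    | cons c rest IHcs =>
      intro n w st path best
      rw [pvRunB.eq_def, pvFoldA]
      by_cases hc : PySem.Set.contains path c = true
      · simp only [hc, if_true]
        exact IHcs n w st path best
      · have hc' : PySem.Set.contains path c = false := by simpa using hc
        simp only [hc', Bool.false_eq_true, if_false]
        cases f with
        | zero => rw [pvHelperA]
        | succ f' =>
          dsimp only
          rw [IHf f' (Nat.lt_succ_self f')]
          rw [pvHelperA]
          rcases hfold : pvFoldA g As ms f' (g.getD c []) (PySem.Set.add path c)
              ((PySem.List.pyGet? As c).getD 0) best with _ | ⟨Wc, b⟩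
          · rfl
          · simp only []
            rw [pv_discard_add path c (by simpa using hc')]
            exact IHcs n (w + Wc) st path (max b (PySem.Int.mod (Wc * (ms - Wc)) pvMOD))

-- ===== VERDICT (by name: the statement is the Claim_ definition above) =====
theorem deleteEdge_spec : Claim_equal_deleteEdge := by
  intro A B _hDom _hPre
  unfold Spec_deleteEdge deleteEdge deleteEdge_alt
  have hAdj : pvAdjB B = pvAdjA B := rfl
  rw [hAdj, pvRun_eq_fold]
  rw [show (2 * B.length + 2) = Nat.succ (2 * B.length + 1) from rfl, pvHelperA]
  rcases hfold : pvFoldA (pvAdjA B) A A.sum (2 * B.length + 1) ((pvAdjA B).getD 0 [])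
      (PySem.Set.add PySem.Set.empty 0) ((PySem.List.pyGet? A 0).getD 0) 0 with _ | ⟨W, b⟩
  · rfl
  · rfl
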